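-- pv_equiv track=rewrite | github.com/JoshuaMKW/Juniors-Toolbox | sms_bin_editor/utils/j3d/widgets/rarc.py | hash_name
-- ===== SOURCE A (Python) =====
-- def hash_name(name):
--     hash = 0
--     multiplier = 1
--     if len(name) + 1 == 2:
--         multiplier = 2
--     elif len(name) + 1 >= 3:
--         multiplier = 3
--
--     for letter in name:
--         hash = (hash*multiplier) & 0xFFFF
--         hash = (hash + ord(letter)) & 0xFFFF
--
--     return hash
-- ===== SOURCE B (Python) =====
-- def hash_name(name):
--     n = len(name)
--     m = 1 if n == 0 else (2 if n == 1 else 3)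
--     return sum(ord(c) * pow(m, n - 1 - i, 0x10000) for i, c in enumerate(name)) & 0xFFFF
-- ===== Notes on version B (the rewrite author's own statement) =====
-- stated objective: alternative
-- what changed: Replaces the Horner-style rolling fold with masking after every step by a direct evaluation of the hash polynomial: each character contributes ord(c) * m^(n-1-i) mod 2^16 as an independent term, summed once and masked once.
import Mathlib
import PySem

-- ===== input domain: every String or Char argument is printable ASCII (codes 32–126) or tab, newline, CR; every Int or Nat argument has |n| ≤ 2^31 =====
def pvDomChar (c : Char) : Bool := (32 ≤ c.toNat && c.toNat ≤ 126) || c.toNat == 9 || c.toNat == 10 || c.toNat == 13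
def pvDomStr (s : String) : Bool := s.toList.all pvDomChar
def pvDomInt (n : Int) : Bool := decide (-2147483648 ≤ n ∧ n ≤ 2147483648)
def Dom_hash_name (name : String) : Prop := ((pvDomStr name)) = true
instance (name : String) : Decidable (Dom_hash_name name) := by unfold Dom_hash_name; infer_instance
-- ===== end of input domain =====

-- B evaluates the hash polynomial as independent position-weighted terms (modular powers)
-- summed once and masked once, instead of A's Horner-style rolling fold masked at every step.

-- ===== PORT A =====
def hash_name (name : String) : Int :=
  let multiplier : Int :=
    if name.toList.length + 1 = 2 then 2
    else if name.toList.length + 1 ≥ 3 then 3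
    else 1
  name.toList.foldl
    (fun h c =>
      PySem.Int.band (PySem.Int.band (h * multiplier) 0xFFFF + (c.toNat : Int)) 0xFFFF) 0

-- ===== PORT B =====
-- pow(m, e, 0x10000) = m ^ e % 65536 here: m ≥ 0 and the exponent n-1-i is ≥ 0 for every
-- enumerated index i < n, so `.toNat` on the exponent is exact.
def hash_name_alt (name : String) : Int :=
  let l := name.toList
  let n : Int := (l.length : Int)
  let m : Int := if n = 0 then 1 else if n = 1 then 2 else 3
  PySem.Int.band
    ((PySem.List.enumerate l).foldl
      (fun s p => s + (p.2.toNat : Int) * (m ^ ((n - 1 - p.1).toNat) % 65536)) 0)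
    0xFFFF

-- ===== PRECONDITION & SPEC =====
def Spec_hash_name (name : String) (out : Int) : Prop := out = hash_name_alt name
instance (name : String) (out : Int) : Decidable (Spec_hash_name name out) := by unfold Spec_hash_name; infer_instance

-- ===== CLAIM (what is proved, stated in full; the proofs are below) =====
def Claim_equal_hash_name : Prop := ∀ (name : String), Dom_hash_name name → Spec_hash_name name (hash_name name)

-- ===== LEMMAS AND PROOFS =====

theorem pv_band_eq_mod (a : Int) (h : 0 ≤ a) : PySem.Int.band a 65535 = a % 65536 := by
  obtain ⟨m, rfl⟩ := Int.eq_ofNat_of_zero_le h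
  rw [show (65535 : Int) = ((65535 : Nat) : Int) by norm_num, PySem.Int.band_natCast]
  have h2 := Nat.and_two_pow_sub_one_eq_mod m 16
  norm_num at h2
  rw [h2]
  push_cast
  ring

/-- Unmasked Horner evaluation of the hash polynomial. -/
def pvHorner (m : Int) (l : List Char) (a : Int) : Int :=
  l.foldl (fun h c => h * m + (c.toNat : Int)) a

theorem pvA_eq (m : Int) (hm : 0 ≤ m) (l : List Char) : ∀ a : Int,
    l.foldl (fun h c =>
        PySem.Int.band (PySem.Int.band (h * m) 65535 + (c.toNat : Int)) 65535) (a % 65536)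
      = pvHorner m l a % 65536 := by
  induction l with
  | nil => intro a; rfl
  | cons c t ih =>
    intro a
    have h1 : (0 : Int) ≤ a % 65536 * m :=
      mul_nonneg (Int.emod_nonneg a (by norm_num)) hm
    have h2 : (0 : Int) ≤ a % 65536 * m % 65536 + (c.toNat : Int) := by
      have := Int.emod_nonneg (a % 65536 * m) (show (65536:Int) ≠ 0 by norm_num)
      positivity
    have hstep : PySem.Int.band (PySem.Int.band (a % 65536 * m) 65535 + (c.toNat : Int)) 65535
        = (a * m + (c.toNat : Int)) % 65536 := by
      rw [pv_band_eq_mod _ h1, pv_band_eq_mod _ h2]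
      conv_rhs => rw [Int.add_emod, Int.mul_emod]
      conv_lhs => rw [Int.add_emod, Int.emod_emod_of_dvd _ dvd_rfl, Int.mul_emod,
        Int.emod_emod_of_dvd _ dvd_rfl]
    simp only [List.foldl_cons, hstep, ih (a * m + (c.toNat : Int))]
    rfl

theorem pvSum_mod (l : List (Int × Char)) (f g : Int × Char → Int)
    (h : ∀ p ∈ l, f p % 65536 = g p % 65536) :
    (l.map f).sum % 65536 = (l.map g).sum % 65536 := by
  induction l with
  | nil => rfl
  | cons p t ih =>
    simp only [List.map_cons, List.sum_cons]
    rw [Int.add_emod, h p (by simp), ih (fun q hq => h q (by simp [hq])), ← Int.add_emod]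

theorem pvPoly (m : Int) (l : List Char) :
    ((PySem.List.enumerate l).map
        (fun p => (p.2.toNat : Int) * m ^ (((l.length : Int) - 1 - p.1).toNat))).sum
      = pvHorner m l 0 := by
  induction l using List.reverseRecOn with
  | nil => rfl
  | append_singleton t c ih =>
    rw [PySem.List.enumerate_append]
    simp only [List.map_append, List.sum_append]
    have hmap : (PySem.List.enumerate t).map
        (fun p => (p.2.toNat : Int) * m ^ ((((t ++ [c]).length : Int) - 1 - p.1).toNat))
        = (PySem.List.enumerate t).map
        (fun p => ((p.2.toNat : Int) * m ^ (((t.length : Int) - 1 - p.1).toNat)) * m) := by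
      apply List.map_congr_left
      intro p hp
      obtain ⟨k, hk, rfl⟩ := (PySem.List.mem_enumerate_iff t 0 p).mp hp
      have hexp : (((t ++ [c]).length : Int) - 1 - (0 + (k : Int))).toNat
          = ((t.length : Int) - 1 - (0 + (k : Int))).toNat + 1 := by
        simp only [List.length_append, List.length_cons, List.length_nil]
        omega
      rw [hexp, pow_succ]
      ring
    rw [hmap, List.sum_map_mul_right, ih]
    have hsingle : PySem.List.enumerate [c] ((0 : Int) + (t.length : Int))
        = [(((t.length : Int)), c)] := by
      simp [PySem.List.enumerate_cons, PySem.List.enumerate_nil]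
    rw [hsingle]
    simp only [List.map_cons, List.map_nil, List.sum_cons, List.sum_nil]
    have hexp0 : (((t ++ [c]).length : Int) - 1 - (t.length : Int)).toNat = 0 := by
      simp only [List.length_append, List.length_cons, List.length_nil]
      omega
    rw [hexp0, pow_zero]
    unfold pvHorner
    rw [List.foldl_append]
    simp

-- ===== VERDICT (by name: the statement is the Claim_ definition above) =====
theorem hash_name_spec : Claim_equal_hash_name := by
  intro name _
  unfold Spec_hash_name hash_name hash_name_alt
  set l := name.toList with hl
  set mA : Int := if l.length + 1 = 2 then 2 else if l.length + 1 ≥ 3 then 3 else 1 with hmA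
  set mB : Int := if (l.length : Int) = 0 then 1 else if (l.length : Int) = 1 then 2 else 3
    with hmB
  have hm : mA = mB := by
    rw [hmA, hmB]; split_ifs <;> omega
  have hmApos : (0 : Int) ≤ mA := by
    rw [hmA]; split_ifs <;> norm_num
  -- A side
  have hA : l.foldl (fun h c =>
      PySem.Int.band (PySem.Int.band (h * mA) 65535 + (c.toNat : Int)) 65535) 0
      = pvHorner mA l 0 % 65536 := by
    have := pvA_eq mA hmApos l 0
    simpa using this
  -- B side
  have hFold : (PySem.List.enumerate l).foldl
      (fun s p => s + (p.2.toNat : Int) * (mB ^ (((l.length : Int) - 1 - p.1).toNat) % 65536)) 0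
      = ((PySem.List.enumerate l).map
          (fun p => (p.2.toNat : Int) * (mB ^ (((l.length : Int) - 1 - p.1).toNat) % 65536))).sum := by
    rw [PySem.List.foldl_add]; ring
  have hSnonneg : (0 : Int) ≤ ((PySem.List.enumerate l).map
      (fun p => (p.2.toNat : Int) * (mB ^ (((l.length : Int) - 1 - p.1).toNat) % 65536))).sum := by
    apply List.sum_nonneg
    intro x hx
    obtain ⟨p, _, rfl⟩ := List.mem_map.mp hx
    exact mul_nonneg (Int.natCast_nonneg _) (Int.emod_nonneg _ (by norm_num))
  have hModCongr : ((PySem.List.enumerate l).map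
      (fun p => (p.2.toNat : Int) * (mB ^ (((l.length : Int) - 1 - p.1).toNat) % 65536))).sum % 65536
      = ((PySem.List.enumerate l).map
      (fun p => (p.2.toNat : Int) * mB ^ (((l.length : Int) - 1 - p.1).toNat))).sum % 65536 := by
    apply pvSum_mod
    intro p _
    rw [Int.mul_emod, Int.emod_emod_of_dvd _ dvd_rfl, ← Int.mul_emod]
  show l.foldl (fun h c =>
      PySem.Int.band (PySem.Int.band (h * mA) 65535 + (c.toNat : Int)) 65535) 0
    = PySem.Int.band ((PySem.List.enumerate l).foldl
        (fun s p => s + (p.2.toNat : Int) * (mB ^ (((l.length : Int) - 1 - p.1).toNat) % 65536)) 0)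
        65535
  rw [hA, hFold, pv_band_eq_mod _ hSnonneg, hModCongr, pvPoly, hm]
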